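-- pv_equiv track=rewrite | github.com/larymak/Python-project-Scripts | FindLongestWord/main.py | find_longest_words
-- ===== SOURCE A (Python) =====
-- def find_longest_words(file_content):
--     last_length = 0
--     words = []
--     # the first loop is on each line
--     for line in file_content:
--         # gradually searching longest words dividing each line in a list of words and looping on the list
--         for el in line.split():
--             if len(el) > last_length:
--                 words = [el]
--                 last_length = len(el)
--             elif len(el) == last_length:
--                 if el not in words:
--                     words.append(el)
--     return words, last_length
-- ===== SOURCE B (Python) =====
-- def find_longest_words(file_content):
--     words = [w for line in file_content for w in line.split()]
--     max_len = max((len(w) for w in words), default=0)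
--     result = []
--     for w in words:
--         if len(w) == max_len and w not in result:
--             result.append(w)
--     return result, max_len
-- ===== Notes on version B (the rewrite author's own statement) =====
-- stated objective: alternative
-- what changed: A keeps a running maximum and resets/extends its candidate list inside one nested loop; B first flattens all lines into one word list, computes the maximum length in a closed first pass, then collects distinct words of exactly that length in a second pass.
import Mathlib
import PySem

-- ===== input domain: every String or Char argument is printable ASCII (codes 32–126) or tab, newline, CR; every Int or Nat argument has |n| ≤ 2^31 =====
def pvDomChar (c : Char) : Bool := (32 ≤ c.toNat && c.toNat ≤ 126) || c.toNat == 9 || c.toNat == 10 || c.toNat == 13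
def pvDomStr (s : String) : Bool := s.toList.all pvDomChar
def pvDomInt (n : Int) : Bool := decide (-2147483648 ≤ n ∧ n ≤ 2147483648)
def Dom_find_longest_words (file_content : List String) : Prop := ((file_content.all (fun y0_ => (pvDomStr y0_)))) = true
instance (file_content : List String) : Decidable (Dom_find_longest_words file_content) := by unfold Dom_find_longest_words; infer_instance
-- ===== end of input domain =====

-- B replaces A's single nested loop with running maximum and list resets by a flatten pass,
-- a closed max-length pass, and a collect pass over the flattened word list (objective: alternative).


-- ===== PORT A =====
def find_longest_words (file_content : List String) : List String × Int :=
  file_content.foldl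
    (fun st line =>
      (PySem.Str.split₀ line).foldl
        (fun st el =>
          if PySem.Str.len el > st.2 then ([el], PySem.Str.len el)
          else if PySem.Str.len el = st.2 then
            (if el ∈ st.1 then st else (st.1 ++ [el], st.2))
          else st)
        st)
    ([], 0)

-- ===== PORT B =====
def find_longest_words_alt (file_content : List String) : List String × Int :=
  let words := file_content.flatMap PySem.Str.split₀
  let maxLen := words.foldl (fun acc w => max acc (PySem.Str.len w)) 0
  let result := words.foldl
    (fun acc w => if PySem.Str.len w = maxLen ∧ w ∉ acc then acc ++ [w] else acc) []
  (result, maxLen)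

-- ===== PRECONDITION & SPEC =====
def Spec_find_longest_words (file_content : List String) (out : List String × Int) : Prop := out = find_longest_words_alt file_content
instance (file_content : List String) (out : List String × Int) : Decidable (Spec_find_longest_words file_content out) := by unfold Spec_find_longest_words; infer_instance

-- ===== CLAIM (what is proved, stated in full; the proofs are below) =====
def Claim_equal_find_longest_words : Prop := ∀ (file_content : List String), Dom_find_longest_words file_content → Spec_find_longest_words file_content (find_longest_words file_content)

-- ===== LEMMAS AND PROOFS =====

-- A's inner loop body, abstracted for the proofs
def pvStep (st : List String × Int) (el : String) : List String × Int :=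
  if PySem.Str.len el > st.2 then ([el], PySem.Str.len el)
  else if PySem.Str.len el = st.2 then
    (if el ∈ st.1 then st else (st.1 ++ [el], st.2))
  else st

lemma pvStep_def (c : List String) (L : Int) (el : String) :
    pvStep (c, L) el =
      if PySem.Str.len el > L then ([el], PySem.Str.len el)
      else if PySem.Str.len el = L then
        (if el ∈ c then (c, L) else (c ++ [el], L))
      else (c, L) := rfl

-- B's running max over word lengths
def pvMaxL (ws : List String) : Int := ws.foldl (fun acc w => max acc (PySem.Str.len w)) 0

-- B's collect loop for a fixed target length
def pvCollect (M : Int) (ws : List String) : List String :=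
  ws.foldl (fun acc w => if PySem.Str.len w = M ∧ w ∉ acc then acc ++ [w] else acc) []

lemma pvCollect_no_hit (M : Int) (ws : List String) (acc : List String)
    (h : ∀ u ∈ ws, PySem.Str.len u ≠ M) :
    ws.foldl (fun acc w => if PySem.Str.len w = M ∧ w ∉ acc then acc ++ [w] else acc) acc = acc := by
  induction ws generalizing acc with
  | nil => rfl
  | cons u t ih =>
    have hcond : ¬ (PySem.Str.len u = M ∧ u ∉ acc) :=
      fun hc => h u List.mem_cons_self hc.1
    rw [List.foldl_cons, if_neg hcond]
    exact ih acc (fun v hv => h v (List.mem_cons_of_mem _ hv))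

lemma pv_A_fold_eq (ws : List String) :
    ws.foldl pvStep ([], 0) = (pvCollect (pvMaxL ws) ws, pvMaxL ws) := by
  induction ws using List.reverseRecOn with
  | nil => rfl
  | append_singleton ws w ih =>
    have hmax : pvMaxL (ws ++ [w]) = max (pvMaxL ws) (PySem.Str.len w) := by
      simp only [pvMaxL, List.foldl_append, List.foldl_cons, List.foldl_nil]
    have hbound : ∀ u ∈ ws, PySem.Str.len u ≤ pvMaxL ws :=
      (PySem.List.le_foldl_max_int ws PySem.Str.len 0).2
    rw [List.foldl_append, ih]
    simp only [List.foldl_cons, List.foldl_nil]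
    rcases lt_trichotomy (pvMaxL ws) (PySem.Str.len w) with hlt | heq | hgt
    · -- new strict maximum: candidate list resets to [w]
      have hM : pvMaxL (ws ++ [w]) = PySem.Str.len w := by rw [hmax]; omega
      have hcoll : pvCollect (PySem.Str.len w) (ws ++ [w]) = [w] := by
        unfold pvCollect
        rw [List.foldl_append,
          pvCollect_no_hit (PySem.Str.len w) ws []
            (fun u hu => by have := hbound u hu; omega),
          List.foldl_cons, List.foldl_nil,
          if_pos ⟨rfl, List.not_mem_nil⟩, List.nil_append]
      rw [pvStep_def, if_pos hlt, hM, hcoll]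
    · -- equal to the running maximum: append if new
      have hM : pvMaxL (ws ++ [w]) = pvMaxL ws := by rw [hmax]; omega
      have hcoll : pvCollect (pvMaxL ws) (ws ++ [w]) =
          if w ∈ pvCollect (pvMaxL ws) ws then pvCollect (pvMaxL ws) ws
          else pvCollect (pvMaxL ws) ws ++ [w] := by
        show (ws ++ [w]).foldl _ [] = _
        rw [List.foldl_append, List.foldl_cons, List.foldl_nil]
        by_cases hmem : w ∈ pvCollect (pvMaxL ws) ws
        · rw [if_neg (fun hc => hc.2 hmem), if_pos hmem]
          rfl
        · rw [if_pos ⟨heq.symm, hmem⟩, if_neg hmem]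
          rfl
      rw [hM, hcoll, pvStep_def, if_neg (by omega), if_pos heq.symm]
      by_cases hmem : w ∈ pvCollect (pvMaxL ws) ws
      · rw [if_pos hmem, if_pos hmem]
      · rw [if_neg hmem, if_neg hmem]
    · -- shorter than the running maximum: state unchanged
      have hM : pvMaxL (ws ++ [w]) = pvMaxL ws := by rw [hmax]; omega
      have hcoll : pvCollect (pvMaxL ws) (ws ++ [w]) = pvCollect (pvMaxL ws) ws := by
        show (ws ++ [w]).foldl _ [] = _
        rw [List.foldl_append, List.foldl_cons, List.foldl_nil,
          if_neg (fun hc => absurd hc.1 (by omega))]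
        rfl
      rw [hM, hcoll, pvStep_def, if_neg (by omega), if_neg (by omega)]

lemma pv_A_eq_flat (fc : List String) :
    find_longest_words fc = (fc.flatMap PySem.Str.split₀).foldl pvStep ([], 0) := by
  rw [List.foldl_flatMap]
  rfl

-- ===== VERDICT (by name: the statement is the Claim_ definition above) =====
theorem find_longest_words_spec : Claim_equal_find_longest_words := by
  intro fc _
  show find_longest_words fc = find_longest_words_alt fc
  rw [pv_A_eq_flat, pv_A_fold_eq]
  rfl
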